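-- pv_equiv track=rewrite | github.com/liuwei464976266/mygit | play/QM9000JAVA.py | filterAdpoints
-- ===== SOURCE A (Python) =====
-- import copy
--
-- WILD = [10]
--
-- WILD_STR = ['10']
--
-- SCATTER = '9'
--
-- def filterAdpoints(adpoints, points):
--     filtedAdpoints = {}
--     myadpoints = copy.deepcopy(adpoints)  # 拷贝一个 myadpoints 避免后续直接修改adpoints对象
--     myDicAdpoints = {}
--     for key, value in myadpoints.items():
--         # if key != SCATTER and key != '11':
--         if key != '11':
--             col1, col2, col3, col4, col5 = [], [], [], [], []
--             for i in value:
--                 if i % 5 == 0: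
--                     col1.append(i)
--                 elif i % 5 == 1:
--                     col2.append(i)
--                 elif i % 5 == 2:
--                     col3.append(i)
--                 elif i % 5 == 3:
--                     col4.append(i)
--                 elif i % 5 == 4:
--                     col5.append(i)
--             if len(col5) > 0:
--                 mylinepoints = [[a, b, c, d, e] for a in col1 for b in col2 for c in col3 for d in col4 for e in col5]
--             elif len(col4) > 0:
--                 mylinepoints = [[a, b, c, d] for a in col1 for b in col2 for c in col3 for d in col4]
--             elif len(col3) > 0:
--                 mylinepoints = [[a, b, c] for a in col1 for b in col2 for c in col3]
--             elif len(col2) > 0: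
--                 mylinepoints = [[a, b] for a in col1 for b in col2]
--             else:
--                 mylinepoints = []
--             removeLines = []
--             for i in mylinepoints:
--                 if len([x for x in i if points[x] not in WILD]) <= 0 and key not in WILD_STR:
--                     removeLines.append(i)
--             for i in removeLines:
--                 mylinepoints.remove(i)
--             myListAdpoints = []
--             for i in mylinepoints:
--                 myListAdpoints += i
--             myListAdpoints = list(set(myListAdpoints))
--             myDicAdpoints[key] = myListAdpoints
--         elif key == SCATTER:
--             myDicAdpoints[SCATTER] = value
--         elif key == '11':
--             myDicAdpoints['11'] = value
--     return myDicAdpoints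
-- ===== SOURCE B (Python) =====
-- WILD = [10]
--
-- WILD_STR = ['10']
--
--
-- def filterAdpoints(adpoints, points):
--     result = {}
--     for key, value in adpoints.items():
--         if key == '11':
--             result['11'] = value
--             continue
--         columns = [[i for i in value if i % 5 == r] for r in range(5)]
--         while len(columns) > 1 and not columns[-1]:
--             columns.pop()
--         keep_all = key in WILD_STR
--         used = set()
--
--         def walk(depth, line):
--             if depth == len(columns):
--                 if keep_all or any(points[x] not in WILD for x in line):
--                     used.update(line)
--                 return
--             for x in columns[depth]:
--                 walk(depth + 1, line + [x])
--
--         if len(columns) > 1: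
--             walk(0, [])
--         result[key] = list(used)
--     return result
-- ===== Notes on version B (the rewrite author's own statement) =====
-- stated objective: simpler
-- what changed: B replaces A's four-way arity branch of nested comprehensions plus a build-remove-flatten-dedup pipeline by one recursive generator over the trimmed column list that filters all-wild combinations during generation and adds the points of each surviving combination to a set incrementally; Pre_ excludes only inputs where A raises IndexError (a combination cell indexing points out of range).
import Mathlib
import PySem

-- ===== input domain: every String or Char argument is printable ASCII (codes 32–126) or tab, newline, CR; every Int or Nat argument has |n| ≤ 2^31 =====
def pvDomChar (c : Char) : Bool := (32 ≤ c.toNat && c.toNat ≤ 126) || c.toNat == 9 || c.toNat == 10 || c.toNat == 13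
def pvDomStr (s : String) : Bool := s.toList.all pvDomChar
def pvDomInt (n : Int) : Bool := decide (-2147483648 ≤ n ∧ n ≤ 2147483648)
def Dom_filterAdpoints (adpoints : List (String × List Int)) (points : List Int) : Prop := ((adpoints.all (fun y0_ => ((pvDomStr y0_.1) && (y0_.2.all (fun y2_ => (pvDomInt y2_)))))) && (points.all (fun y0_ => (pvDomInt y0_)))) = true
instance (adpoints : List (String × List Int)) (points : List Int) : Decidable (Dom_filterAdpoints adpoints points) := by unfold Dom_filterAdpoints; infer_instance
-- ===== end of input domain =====

-- B replaces A's arity branch of nested comprehensions plus build-remove-flatten pipeline by one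
-- recursive generator over the trimmed column list that filters all-wild combinations during
-- generation and feeds the set incrementally (objective: simpler; same insertion sequence, so the
-- CPython set order is unchanged).

-- Shared module constants, and shared sub-ports of Python constructs both programs use:
-- pvNW x = `points[x] not in WILD` (total via pyGetD; exact under Pre_, which puts x in range),
-- pySetList = CPython's `list(set(xs))` for ints, exact for |x| < 2^61 (hash x = x, hash (-1) = -2;
-- duplicate insertion into a CPython set is a no-op, so the table is built from first occurrences).

def pvWILD : List Int := [10]
def pvWILD_STR : List String := ["10"]
def pvSCATTER : String := "9"

def pvNW (points : List Int) (x : Int) : Bool := !(pvWILD.contains (PySem.List.pyGetD points x 0))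

-- first occurrences of xs that are not in seen (duplicate set-insertion is a no-op)
def pvDedup (seen : List Int) : List Int → List Int
  | [] => []
  | x :: t => if x ∈ seen then pvDedup seen t else x :: pvDedup (x :: seen) t

def pvHash (x : Int) : Int := if x = -1 then -2 else x

-- the C `size_t` view of a hash (64-bit two's complement)
def pvU64 (h : Int) : Nat :=
  if 0 ≤ h then h.toNat % 18446744073709551616
  else (18446744073709551616 - ((-h).toNat % 18446744073709551616)) % 18446744073709551616

-- first empty slot among i+1 .. i+9 (CPython's LINEAR_PROBES scan)
def pvLinScan (table : List (Option Int)) (i : Nat) : Nat → Option Nat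
  | 0 => none
  | n + 1 => if (table.getD (i + 1) none).isNone then some (i + 1) else pvLinScan table (i + 1) n

-- CPython set probing (set_insert_clean): start at hash & mask, 9 linear probes when they fit,
-- else i = i*5 + 1 + (perturb >>= 5) mod the table size; fuel is generous (the table is never full)
def pvProbe (table : List (Option Int)) (mask i perturb : Nat) : Nat → Nat
  | 0 => i
  | fuel + 1 =>
    if (table.getD i none).isNone then i
    else
      match (if i + 9 ≤ mask then pvLinScan table i 9 else none) with
      | some j => j
      | none =>
        let p := perturb >>> 5
        pvProbe table mask ((i * 5 + 1 + p) % (mask + 1)) p fuel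

def pvInsClean (table : List (Option Int)) (x : Int) : List (Option Int) :=
  let mask := table.length - 1
  table.set (pvProbe table mask (pvU64 (pvHash x) % (mask + 1)) (pvU64 (pvHash x)) (2 * (mask + 1) + 64)) (some x)

-- smallest power of two > minused, starting from PySet_MINSIZE = 8
def pvNewSize (minused : Nat) : Nat := (List.range 64).foldl (fun c _ => if c ≤ minused then c * 2 else c) 8

-- one fresh insertion, then CPython's resize rule (fill*5 >= mask*3)
def pvAddOne (st : List (Option Int) × Nat) (x : Int) : List (Option Int) × Nat :=
  let table := pvInsClean st.1 x
  let fill := st.2 + 1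
  if (table.length - 1) * 3 ≤ fill * 5 then
    let minused := if 50000 < fill then fill * 2 else fill * 4
    ((table.filterMap id).foldl (fun t y => pvInsClean t y) (List.replicate (pvNewSize minused) none), fill)
  else (table, fill)

-- list(set(xs)) for ints: insert the first occurrences, read the table in slot order
def pySetList (xs : List Int) : List Int :=
  (((pvDedup [] xs).foldl pvAddOne (List.replicate 8 none, 0)).1).filterMap id

-- dict(adpoints): Python dict construction (last value wins, first-insertion position)
def pvDictOf (adpoints : List (String × List Int)) : PySem.Dict String (List Int) :=
  adpoints.foldl (fun d kv => d.insert kv.1 kv.2) PySem.Dict.empty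

-- ===== PORT A =====
-- the single-pass column bucketing (the `for i in value` loop)
def pvColsStep (t : List Int × List Int × List Int × List Int × List Int) (i : Int) :
    List Int × List Int × List Int × List Int × List Int :=
  if PySem.Int.mod i 5 == 0 then (t.1 ++ [i], t.2.1, t.2.2.1, t.2.2.2.1, t.2.2.2.2)
  else if PySem.Int.mod i 5 == 1 then (t.1, t.2.1 ++ [i], t.2.2.1, t.2.2.2.1, t.2.2.2.2)
  else if PySem.Int.mod i 5 == 2 then (t.1, t.2.1, t.2.2.1 ++ [i], t.2.2.2.1, t.2.2.2.2)
  else if PySem.Int.mod i 5 == 3 then (t.1, t.2.1, t.2.2.1, t.2.2.2.1 ++ [i], t.2.2.2.2)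
  else if PySem.Int.mod i 5 == 4 then (t.1, t.2.1, t.2.2.1, t.2.2.2.1, t.2.2.2.2 ++ [i])
  else t

-- the body A runs for a key with key != '11'
def pvABody (points : List Int) (key : String) (value : List Int) : List Int :=
  let cols := value.foldl pvColsStep ([], [], [], [], [])
  let col1 := cols.1
  let col2 := cols.2.1
  let col3 := cols.2.2.1
  let col4 := cols.2.2.2.1
  let col5 := cols.2.2.2.2
  let mylinepoints :=
    if 0 < col5.length then
      col1.flatMap (fun a => col2.flatMap (fun b => col3.flatMap (fun c => col4.flatMap (fun d => col5.map (fun e => [a, b, c, d, e])))))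
    else if 0 < col4.length then
      col1.flatMap (fun a => col2.flatMap (fun b => col3.flatMap (fun c => col4.map (fun d => [a, b, c, d]))))
    else if 0 < col3.length then
      col1.flatMap (fun a => col2.flatMap (fun b => col3.map (fun c => [a, b, c])))
    else if 0 < col2.length then
      col1.flatMap (fun a => col2.map (fun b => [a, b]))
    else []
  let removeLines := mylinepoints.foldl
    (fun acc i =>
      if decide ((i.filter (pvNW points)).length ≤ 0) && !(pvWILD_STR.contains key) then acc ++ [i]
      else acc) []
  -- (each removed line is a member, so list.remove never raises; getD is never the fallback)
  let mylinepoints2 := removeLines.foldl (fun l i => (PySem.List.remove? l i).getD l) mylinepoints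
  let myListAdpoints := mylinepoints2.foldl (fun acc i => acc ++ i) []
  pySetList myListAdpoints

def filterAdpoints (adpoints : List (String × List Int)) (points : List Int) : List (String × List Int) :=
  ((pvDictOf adpoints).items.foldl
    (fun out kv =>
      if kv.1 ≠ "11" then out.insert kv.1 (pvABody points kv.1 kv.2)
      else if kv.1 == pvSCATTER then out.insert pvSCATTER kv.2  -- unreachable elif, kept from A
      else if kv.1 == "11" then out.insert "11" kv.2
      else out)
    PySem.Dict.empty).items

-- ===== PORT B =====
-- `while len(columns) > 1 and not columns[-1]: columns.pop()`
def pvTrim (cols : List (List Int)) : List (List Int) :=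
  if _h : 1 < cols.length ∧ cols.getLast? = some [] then pvTrim cols.dropLast else cols
termination_by cols.length
decreasing_by simp only [List.length_dropLast]; omega

-- the recursive generator `walk(depth, line)` (the set insertion stream it produces)
def pvWalk (points : List Int) (keepAll : Bool) : List (List Int) → List Int → List Int
  | [], line => if keepAll || line.any (pvNW points) then line else []
  | c :: rest, line =>
      c.foldl (fun acc x => acc ++ pvWalk points keepAll rest (line ++ [x])) []

-- the body B runs for a key with key != '11'  (`range(5)` comprehension unrolled)
def pvBBody (points : List Int) (key : String) (value : List Int) : List Int :=
  let cols := [value.filter (fun i => PySem.Int.mod i 5 == 0),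
               value.filter (fun i => PySem.Int.mod i 5 == 1),
               value.filter (fun i => PySem.Int.mod i 5 == 2),
               value.filter (fun i => PySem.Int.mod i 5 == 3),
               value.filter (fun i => PySem.Int.mod i 5 == 4)]
  let cols := pvTrim cols
  let keepAll := pvWILD_STR.contains key
  let stream := if 1 < cols.length then pvWalk points keepAll cols [] else []
  pySetList stream

def filterAdpoints_alt (adpoints : List (String × List Int)) (points : List Int) : List (String × List Int) :=
  ((pvDictOf adpoints).items.foldl
    (fun out kv =>
      if kv.1 == "11" then out.insert "11" kv.2
      else out.insert kv.1 (pvBBody points kv.1 kv.2))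
    PySem.Dict.empty).items

-- ===== PRECONDITION & SPEC =====
-- the elements a key's non-empty combination list indexes points with
def pvIndexed (value : List Int) : List Int :=
  let c1 := value.filter (fun i => PySem.Int.mod i 5 == 0)
  let c2 := value.filter (fun i => PySem.Int.mod i 5 == 1)
  let c3 := value.filter (fun i => PySem.Int.mod i 5 == 2)
  let c4 := value.filter (fun i => PySem.Int.mod i 5 == 3)
  let c5 := value.filter (fun i => PySem.Int.mod i 5 == 4)
  let used :=
    if c5 ≠ [] then [c1, c2, c3, c4, c5]
    else if c4 ≠ [] then [c1, c2, c3, c4]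
    else if c3 ≠ [] then [c1, c2, c3]
    else if c2 ≠ [] then [c1, c2]
    else []
  if used.isEmpty || used.any (·.isEmpty) then [] else used.flatten

-- A raises IndexError exactly when some combination line indexes points out of range:
-- for each key other than '11', when its column product is non-empty, every element of the
-- used columns must be a valid (possibly negative) index into points.
def Pre_filterAdpoints (adpoints : List (String × List Int)) (points : List Int) : Prop :=
  ∀ kv ∈ (pvDictOf adpoints).items, kv.1 ≠ "11" →
    ∀ x ∈ pvIndexed kv.2, PySem.Raise.InRange points.length x

instance (adpoints : List (String × List Int)) (points : List Int) : Decidable (Pre_filterAdpoints adpoints points) := by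
  unfold Pre_filterAdpoints; infer_instance

def pvWitness_filterAdpoints : (List (String × List Int)) × List Int := ([("0", [0, 1])], [5, 10])

def Spec_filterAdpoints (adpoints : List (String × List Int)) (points : List Int) (out : List (String × List Int)) : Prop := out = filterAdpoints_alt adpoints points
instance (adpoints : List (String × List Int)) (points : List Int) (out : List (String × List Int)) : Decidable (Spec_filterAdpoints adpoints points out) := by unfold Spec_filterAdpoints; infer_instance

-- ===== CLAIM (what is proved, stated in full; the proofs are below) =====
def Claim_equal_filterAdpoints : Prop := ∀ (adpoints : List (String × List Int)) (points : List Int), Dom_filterAdpoints adpoints points → Pre_filterAdpoints adpoints points → Spec_filterAdpoints adpoints points (filterAdpoints adpoints points)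

-- ===== LEMMAS AND PROOFS =====

-- the cartesian product of a list of columns, last column fastest (lex order of the loops)
def pvProd : List (List Int) → List (List Int)
  | [] => [[]]
  | c :: r => c.flatMap (fun x => (pvProd r).map (x :: ·))

theorem prod5 (c1 c2 c3 c4 c5 : List Int) :
    c1.flatMap (fun a => c2.flatMap (fun b => c3.flatMap (fun c => c4.flatMap (fun d => c5.map (fun e => [a,b,c,d,e]))))) = pvProd [c1,c2,c3,c4,c5] := by
  simp [pvProd, List.map_flatMap, Function.comp_def, ← List.map_eq_flatMap]

theorem prod4 (c1 c2 c3 c4 : List Int) :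
    c1.flatMap (fun a => c2.flatMap (fun b => c3.flatMap (fun c => c4.map (fun d => [a,b,c,d])))) = pvProd [c1,c2,c3,c4] := by
  simp [pvProd, List.map_flatMap, Function.comp_def, ← List.map_eq_flatMap]

theorem prod3 (c1 c2 c3 : List Int) :
    c1.flatMap (fun a => c2.flatMap (fun b => c3.map (fun c => [a,b,c]))) = pvProd [c1,c2,c3] := by
  simp [pvProd, List.map_flatMap, Function.comp_def, ← List.map_eq_flatMap]

theorem prod2 (c1 c2 : List Int) :
    c1.flatMap (fun a => c2.map (fun b => [a,b])) = pvProd [c1,c2] := by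
  simp [pvProd, Function.comp_def, ← List.map_eq_flatMap]

-- the removal test complement is B's keep test
theorem keep_eq (points : List Int) (key : String) (l : List Int) :
    (!(decide ((l.filter (pvNW points)).length ≤ 0) && !(pvWILD_STR.contains key)))
      = (pvWILD_STR.contains key || l.any (pvNW points)) := by
  cases hk : pvWILD_STR.contains key
  · simp only [Bool.not_false, Bool.and_true, Bool.false_or]
    rw [Bool.eq_iff_iff]; simp
  · simp

-- A's column fold = five filters
theorem colsA_eq (v : List Int) : ∀ a b c d e : List Int,
    v.foldl pvColsStep (a, b, c, d, e) =
      (a ++ v.filter (fun i => PySem.Int.mod i 5 == 0),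
       b ++ v.filter (fun i => PySem.Int.mod i 5 == 1),
       c ++ v.filter (fun i => PySem.Int.mod i 5 == 2),
       d ++ v.filter (fun i => PySem.Int.mod i 5 == 3),
       e ++ v.filter (fun i => PySem.Int.mod i 5 == 4)) := by
  induction v with
  | nil => intro a b c d e; simp
  | cons i t ih =>
    intro a b c d e
    simp only [List.foldl_cons, List.filter_cons]
    by_cases h0 : PySem.Int.mod i 5 = 0
    · simp at h0; simp [pvColsStep, h0, ih]; try omega
    · by_cases h1 : PySem.Int.mod i 5 = 1
      · simp at h0 h1; simp [pvColsStep, h1, ih]; try omega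
      · by_cases h2 : PySem.Int.mod i 5 = 2
        · simp at h0 h1 h2; simp [pvColsStep, h2, ih]; try omega
        · by_cases h3 : PySem.Int.mod i 5 = 3
          · simp at h0 h1 h2 h3; simp [pvColsStep, h3, ih]; try omega
          · by_cases h4 : PySem.Int.mod i 5 = 4
            · simp at h0 h1 h2 h3 h4; simp [pvColsStep, h4, ih]; try omega
            · simp at h0 h1 h2 h3 h4; simp [pvColsStep, h0, h1, h2, h3, h4, ih]; try omega

-- B's generator = flatten of the filtered product
theorem walk_eq (points : List Int) (keepAll : Bool) :
    ∀ (cols : List (List Int)) (line : List Int),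
      pvWalk points keepAll cols line
        = ((pvProd cols).filter
            (fun l => keepAll || (line ++ l).any (pvNW points))).flatMap (fun l => line ++ l) := by
  intro cols
  induction cols with
  | nil =>
    intro line
    cases keepAll <;> cases h : line.any (pvNW points) <;> simp [pvWalk, pvProd, h]
  | cons c rest ih =>
    intro line
    rw [pvWalk, PySem.List.foldl_append_eq_flatMap]
    rw [show pvProd (c :: rest) = c.flatMap (fun x => (pvProd rest).map (x :: ·)) from rfl]
    rw [List.filter_flatMap, List.flatMap_assoc]
    simp only [List.nil_append]
    congr 1
    funext x
    rw [ih, List.filter_map, List.flatMap_map]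
    simp [Function.comp_def, List.append_assoc]

theorem fold_remove_cons (x : List Int) (ys : List (List Int)) :
    ∀ t, (∀ y ∈ ys, y ≠ x) →
    List.foldl (fun l i => (PySem.List.remove? l i).getD l) (x :: t) ys
      = x :: List.foldl (fun l i => (PySem.List.remove? l i).getD l) t ys := by
  induction ys with
  | nil => intro t _; rfl
  | cons y ys ih =>
    intro t h
    have hxy : x ≠ y := fun e => h y (by simp) e.symm
    simp only [List.foldl_cons]
    rw [PySem.List.remove?_cons_of_ne t hxy]
    cases hr : PySem.List.remove? t y <;>
      simp [ih _ (fun z hz => h z (by simp [hz]))]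

-- removing (first occurrence of) each element of L.filter p from L leaves L.filter (!p)
theorem fold_remove_filter (p : List Int → Bool) : ∀ L : List (List Int),
    List.foldl (fun l i => (PySem.List.remove? l i).getD l) L (L.filter p)
      = L.filter (fun l => !(p l)) := by
  intro L
  induction L with
  | nil => rfl
  | cons x t ih =>
    by_cases hp : p x
    · simp only [List.filter_cons, hp, if_pos, List.foldl_cons]
      rw [show ((PySem.List.remove? (x :: t) x).getD (x :: t)) = t by
        simp [PySem.List.remove?_cons_self]]
      simp [ih]
    · simp only [List.filter_cons, hp]
      rw [fold_remove_cons x _ t (fun y hy => by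
        intro e; exact hp (by rw [← e]; exact (List.mem_filter.mp hy).2))]
      simp [ih]

-- pvTrim pops a trailing empty column…
theorem pvTrim_snoc_nil (cols : List (List Int)) (h : 0 < cols.length) :
    pvTrim (cols ++ [[]]) = pvTrim cols := by
  rw [pvTrim]
  rw [dif_pos ⟨by simp; omega, by simp⟩]
  simp

-- …and stops at a non-empty last column (or a single column)
theorem pvTrim_eq_self (cols : List (List Int))
    (h : ¬(1 < cols.length ∧ cols.getLast? = some [])) : pvTrim cols = cols := by
  rw [pvTrim, dif_neg h]

theorem body_eq (points : List Int) (key : String) (value : List Int) :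
    pvABody points key value = pvBBody points key value := by
  simp only [pvABody, pvBBody, colsA_eq, List.nil_append]
  by_cases h4 : value.filter (fun i => PySem.Int.mod i 5 == 4) = []
  · by_cases h3 : value.filter (fun i => PySem.Int.mod i 5 == 3) = []
    · by_cases h2 : value.filter (fun i => PySem.Int.mod i 5 == 2) = []
      · by_cases h1 : value.filter (fun i => PySem.Int.mod i 5 == 1) = []
        · -- no usable columns: both sides are list(set([]))
          have ht : pvTrim [value.filter (fun i => PySem.Int.mod i 5 == 0), value.filter (fun i => PySem.Int.mod i 5 == 1), value.filter (fun i => PySem.Int.mod i 5 == 2), value.filter (fun i => PySem.Int.mod i 5 == 3), value.filter (fun i => PySem.Int.mod i 5 == 4)] = [value.filter (fun i => PySem.Int.mod i 5 == 0)] := by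
            rw [h1, h2, h3, h4]
            rw [show [value.filter (fun i => PySem.Int.mod i 5 == 0), ([] : List Int), [], [], []]
                  = (((([value.filter (fun i => PySem.Int.mod i 5 == 0)] ++ [[]]) ++ [[]]) ++ [[]]) ++ [[]]) by simp]
            rw [pvTrim_snoc_nil _ (by simp), pvTrim_snoc_nil _ (by simp),
                pvTrim_snoc_nil _ (by simp), pvTrim_snoc_nil _ (by simp),
                pvTrim_eq_self _ (by simp)]
          rw [ht, if_neg (by rw [h4]; simp), if_neg (by rw [h3]; simp), if_neg (by rw [h2]; simp),
              if_neg (by rw [h1]; simp), if_neg (by simp)]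
          simp
        · -- two columns
          have ht : pvTrim [value.filter (fun i => PySem.Int.mod i 5 == 0), value.filter (fun i => PySem.Int.mod i 5 == 1), value.filter (fun i => PySem.Int.mod i 5 == 2), value.filter (fun i => PySem.Int.mod i 5 == 3), value.filter (fun i => PySem.Int.mod i 5 == 4)] = [value.filter (fun i => PySem.Int.mod i 5 == 0), value.filter (fun i => PySem.Int.mod i 5 == 1)] := by
            rw [h2, h3, h4]
            rw [show [value.filter (fun i => PySem.Int.mod i 5 == 0), value.filter (fun i => PySem.Int.mod i 5 == 1), ([] : List Int), [], []]
                  = ((([value.filter (fun i => PySem.Int.mod i 5 == 0), value.filter (fun i => PySem.Int.mod i 5 == 1)] ++ [[]]) ++ [[]]) ++ [[]]) by simp]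
            rw [pvTrim_snoc_nil _ (by simp), pvTrim_snoc_nil _ (by simp),
                pvTrim_snoc_nil _ (by simp), pvTrim_eq_self _ (by simp only [List.getLast?_cons_cons, List.getLast?_singleton]; rintro ⟨-, e⟩; exact h1 (Option.some.inj e))]
          rw [ht, if_neg (by rw [h4]; simp), if_neg (by rw [h3]; simp), if_neg (by rw [h2]; simp),
              if_pos (List.length_pos_iff.mpr h1), if_pos (by simp)]
          rw [prod2, PySem.List.foldl_append_if_eq_filter, List.nil_append, fold_remove_filter,
              PySem.List.foldl_append_eq_flatMap, walk_eq]
          simp only [List.nil_append, keep_eq]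
      · -- three columns
        have ht : pvTrim [value.filter (fun i => PySem.Int.mod i 5 == 0), value.filter (fun i => PySem.Int.mod i 5 == 1), value.filter (fun i => PySem.Int.mod i 5 == 2), value.filter (fun i => PySem.Int.mod i 5 == 3), value.filter (fun i => PySem.Int.mod i 5 == 4)] = [value.filter (fun i => PySem.Int.mod i 5 == 0), value.filter (fun i => PySem.Int.mod i 5 == 1), value.filter (fun i => PySem.Int.mod i 5 == 2)] := by
          rw [h3, h4]
          rw [show [value.filter (fun i => PySem.Int.mod i 5 == 0), value.filter (fun i => PySem.Int.mod i 5 == 1), value.filter (fun i => PySem.Int.mod i 5 == 2), ([] : List Int), []]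
                = (([value.filter (fun i => PySem.Int.mod i 5 == 0), value.filter (fun i => PySem.Int.mod i 5 == 1), value.filter (fun i => PySem.Int.mod i 5 == 2)] ++ [[]]) ++ [[]]) by simp]
          rw [pvTrim_snoc_nil _ (by simp), pvTrim_snoc_nil _ (by simp),
              pvTrim_eq_self _ (by simp only [List.getLast?_cons_cons, List.getLast?_singleton]; rintro ⟨-, e⟩; exact h2 (Option.some.inj e))]
        rw [ht, if_neg (by rw [h4]; simp), if_neg (by rw [h3]; simp),
            if_pos (List.length_pos_iff.mpr h2), if_pos (by simp)]
        rw [prod3, PySem.List.foldl_append_if_eq_filter, List.nil_append, fold_remove_filter,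
            PySem.List.foldl_append_eq_flatMap, walk_eq]
        simp only [List.nil_append, keep_eq]
    · -- four columns
      have ht : pvTrim [value.filter (fun i => PySem.Int.mod i 5 == 0), value.filter (fun i => PySem.Int.mod i 5 == 1), value.filter (fun i => PySem.Int.mod i 5 == 2), value.filter (fun i => PySem.Int.mod i 5 == 3), value.filter (fun i => PySem.Int.mod i 5 == 4)] = [value.filter (fun i => PySem.Int.mod i 5 == 0), value.filter (fun i => PySem.Int.mod i 5 == 1), value.filter (fun i => PySem.Int.mod i 5 == 2), value.filter (fun i => PySem.Int.mod i 5 == 3)] := by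
        rw [h4]
        rw [show [value.filter (fun i => PySem.Int.mod i 5 == 0), value.filter (fun i => PySem.Int.mod i 5 == 1), value.filter (fun i => PySem.Int.mod i 5 == 2), value.filter (fun i => PySem.Int.mod i 5 == 3), ([] : List Int)]
              = ([value.filter (fun i => PySem.Int.mod i 5 == 0), value.filter (fun i => PySem.Int.mod i 5 == 1), value.filter (fun i => PySem.Int.mod i 5 == 2), value.filter (fun i => PySem.Int.mod i 5 == 3)] ++ [[]]) by simp]
        rw [pvTrim_snoc_nil _ (by simp), pvTrim_eq_self _ (by simp only [List.getLast?_cons_cons, List.getLast?_singleton]; rintro ⟨-, e⟩; exact h3 (Option.some.inj e))]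
      rw [ht, if_neg (by rw [h4]; simp), if_pos (List.length_pos_iff.mpr h3), if_pos (by simp)]
      rw [prod4, PySem.List.foldl_append_if_eq_filter, List.nil_append, fold_remove_filter,
          PySem.List.foldl_append_eq_flatMap, walk_eq]
      simp only [List.nil_append, keep_eq]
  · -- five columns
    have ht : pvTrim [value.filter (fun i => PySem.Int.mod i 5 == 0), value.filter (fun i => PySem.Int.mod i 5 == 1), value.filter (fun i => PySem.Int.mod i 5 == 2), value.filter (fun i => PySem.Int.mod i 5 == 3), value.filter (fun i => PySem.Int.mod i 5 == 4)] = [value.filter (fun i => PySem.Int.mod i 5 == 0), value.filter (fun i => PySem.Int.mod i 5 == 1), value.filter (fun i => PySem.Int.mod i 5 == 2), value.filter (fun i => PySem.Int.mod i 5 == 3), value.filter (fun i => PySem.Int.mod i 5 == 4)] :=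
      pvTrim_eq_self _ (by simp only [List.getLast?_cons_cons, List.getLast?_singleton]; rintro ⟨-, e⟩; exact h4 (Option.some.inj e))
    rw [ht, if_pos (List.length_pos_iff.mpr h4), if_pos (by simp)]
    rw [prod5, PySem.List.foldl_append_if_eq_filter, List.nil_append, fold_remove_filter,
        PySem.List.foldl_append_eq_flatMap, walk_eq]
    simp only [List.nil_append, keep_eq]

theorem ports_eq (adpoints : List (String × List Int)) (points : List Int) :
    filterAdpoints adpoints points = filterAdpoints_alt adpoints points := by
  unfold filterAdpoints filterAdpoints_alt
  have hstep : (fun (out : PySem.Dict String (List Int)) (kv : String × List Int) =>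
      if kv.1 ≠ "11" then out.insert kv.1 (pvABody points kv.1 kv.2)
      else if kv.1 == pvSCATTER then out.insert pvSCATTER kv.2
      else if kv.1 == "11" then out.insert "11" kv.2
      else out)
    = (fun (out : PySem.Dict String (List Int)) (kv : String × List Int) =>
        if kv.1 == "11" then out.insert "11" kv.2
        else out.insert kv.1 (pvBBody points kv.1 kv.2)) := by
    funext out kv
    by_cases h : kv.1 = "11"
    · simp [h, pvSCATTER]
    · simp [h, body_eq]
  rw [hstep]

-- ===== VERDICT (by name: the statement is the Claim_ definition above) =====
theorem filterAdpoints_spec : Claim_equal_filterAdpoints := by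
  intro adpoints points _ _
  unfold Spec_filterAdpoints
  exact ports_eq adpoints points
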